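-- pv_equiv track=rewrite | github.com/lim4373/study | 프로그래머스/1/135808. 과일 장수/과일 장수.py | solution
-- ===== SOURCE A (Python) =====
-- def solution(k, m, score):
--     answer = 0
--     score = sorted(score, reverse = True)
--
--     for i in range(0,len(score),m):
--         apple = score[i:i+m]
--         if len(apple)==m:
--             answer += min(apple)*m
--     return answer
-- ===== SOURCE B (Python) =====
-- def solution(k, m, score):
--     # Frequency/rank-count algorithm: no per-group slicing or min() and no sort of
--     # the full list. Count each value's multiplicity, walk the DISTINCT values from
--     # largest to smallest, and for each value's rank interval [seen, seen+cnt) count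
--     # arithmetically how many group-minimum ranks (ranks r with (r+1) % m == 0,
--     # r < (len//m)*m) fall inside it: that count is hi//m - seen//m.
--     freq = {}
--     for v in score:
--         freq[v] = freq.get(v, 0) + 1
--     limit = (len(score) // m) * m
--     total = 0
--     seen = 0
--     for v in sorted(freq, reverse=True):
--         c = freq[v]
--         hi = min(seen + c, limit)
--         if seen < hi:
--             total += v * (hi // m - seen // m)
--         seen += c
--     return m * total
-- ===== Notes on version B (the rewrite author's own statement) =====
-- stated objective: alternative
-- what changed: B never sorts the score list and never slices or scans a group: it builds a frequency dict in one pass, walks only the DISTINCT values in descending order, and for each value counts arithmetically (hi//m - seen//m) how many group-minimum ranks fall in that value's rank interval; A's sort of the whole list and its per-group slice+min scan disappear.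
-- outside the precondition, e.g. on solution(0, -2, [1, 2, 3]): A returns 0, B returns 8
import Mathlib
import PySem

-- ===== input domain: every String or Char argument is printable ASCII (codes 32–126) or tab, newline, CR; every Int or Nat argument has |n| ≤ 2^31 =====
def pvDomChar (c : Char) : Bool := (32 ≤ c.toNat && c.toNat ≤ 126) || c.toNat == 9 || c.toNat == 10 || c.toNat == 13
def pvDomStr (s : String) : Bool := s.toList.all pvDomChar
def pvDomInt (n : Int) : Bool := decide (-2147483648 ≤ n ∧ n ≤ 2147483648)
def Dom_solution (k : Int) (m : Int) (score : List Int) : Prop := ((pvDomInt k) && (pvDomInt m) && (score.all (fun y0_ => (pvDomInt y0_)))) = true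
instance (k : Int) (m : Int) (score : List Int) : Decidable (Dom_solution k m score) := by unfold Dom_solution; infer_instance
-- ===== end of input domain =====

-- B replaces A's sort-then-slice-and-min-per-group with a frequency dict over the distinct
-- values and rank arithmetic per value (objective: alternative algorithm, same result).

-- ===== PORT A =====
def solution (k : Int) (m : Int) (score : List Int) : Int :=
  let s := PySem.List.sorted score (fun x => x) true
  (PySem.List.pyRange 0 (s.length : Int) m).foldl
    (fun answer i =>
      let apple := PySem.List.slice s (some i) (some (i + m))
      if (apple.length : Int) = m then
        -- min(apple): the guard makes apple nonempty, so the .getD 0 default is never used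
        answer + (PySem.List.min? apple (fun x => x)).getD 0 * m
      else answer) 0

-- ===== PORT B =====
def solution_alt (k : Int) (m : Int) (score : List Int) : Int :=
  let freq := score.foldl (fun d v => d.insert v (d.getD v 0 + 1)) (PySem.Dict.empty : PySem.Dict Int Int)
  let limit := PySem.Int.floordiv (score.length : Int) m * m
  let p := (PySem.List.sorted freq.keys (fun x => x) true).foldl
    (fun (p : Int × Int) v =>
      let c := freq.getD v 0
      let hi := min (p.2 + c) limit
      ((if p.2 < hi then p.1 + v * (PySem.Int.floordiv hi m - PySem.Int.floordiv p.2 m) else p.1),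
       p.2 + c))
    (0, 0)
  m * p.1

-- ===== PRECONDITION & SPEC =====
-- Pre_ restricts to the task's natural domain m ≥ 1 (a positive group size): A raises
-- ValueError (range step 0) at m = 0, and for m < 0 a group size is meaningless (A's
-- empty range returns 0, B's rank arithmetic returns something else).
def Pre_solution (k : Int) (m : Int) (score : List Int) : Prop := 1 ≤ m
instance (k : Int) (m : Int) (score : List Int) : Decidable (Pre_solution k m score) := by unfold Pre_solution; infer_instance
def pvWitness_solution : Int × Int × List Int := (4, 3, [1, 2, 3, 1, 2])

def Spec_solution (k : Int) (m : Int) (score : List Int) (out : Int) : Prop := out = solution_alt k m score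
instance (k : Int) (m : Int) (score : List Int) (out : Int) : Decidable (Spec_solution k m score out) := by unfold Spec_solution; infer_instance

-- ===== CLAIM (what is proved, stated in full; the proofs are below) =====
def Claim_equal_solution : Prop := ∀ (k : Int) (m : Int) (score : List Int), Dom_solution k m score → Pre_solution k m score → Spec_solution k m score (solution k m score)

-- ===== LEMMAS AND PROOFS =====

-- 'if p then a + v else a' folds are a sum
lemma foldl_if_add {α : Type} (l : List α) (p : α → Prop) [DecidablePred p] (v : α → Int) (init : Int) :
    l.foldl (fun a x => if p x then a + v x else a) init
      = init + (l.map (fun x => if p x then v x else 0)).sum := by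
  have h : (fun (a : Int) (x : α) => if p x then a + v x else a)
      = fun a x => a + (if p x then v x else 0) := by
    funext a x; split <;> simp
  rw [h, PySem.List.foldl_add]

lemma sum_map_range (f : Nat → Int) (n : Nat) :
    ((List.range n).map f).sum = ∑ i ∈ Finset.range n, f i := by
  induction n with
  | zero => simp
  | succ n ih => simp [List.range_succ, Finset.sum_range_succ, ih]

-- the minimum of a full descending chunk is its last element
lemma min_desc_chunk (s : List Int) (hs : s.Pairwise (fun a b => b ≤ a))
    (a M : Nat) (hM : 0 < M) (hle : a + M ≤ s.length) :
    (PySem.List.min? ((s.drop a).take M) (fun x => x)).getD 0 = s.getD (a + M - 1) 0 := by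
  set c := (s.drop a).take M with hc
  have hclen : c.length = M := by
    simp [hc, List.length_take, List.length_drop]; omega
  have hcs : c.Sublist s := ((s.drop a).take_sublist M).trans (s.drop_sublist a)
  have hcp : c.Pairwise (fun x y : Int => y ≤ x) := hs.sublist hcs
  have hcne : c ≠ [] := by intro h; rw [h] at hclen; simp at hclen; omega
  obtain ⟨v, hv⟩ : ∃ v, PySem.List.min? c (fun x => x) = some v := by
    cases hmin : PySem.List.min? c (fun x => x) with
    | none => exact absurd ((PySem.List.min?_eq_none_iff c (fun x => x)).mp hmin) hcne
    | some v => exact ⟨v, rfl⟩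
  have hlt : M - 1 < c.length := by omega
  have hlast_mem : getElem c (M - 1) hlt ∈ c := List.getElem_mem hlt
  have h1 : v ≤ getElem c (M - 1) hlt := PySem.List.min?_isMin hv _ hlast_mem
  obtain ⟨i, hi, hiv⟩ := List.mem_iff_getElem.mp (PySem.List.min?_mem hv)
  have h2 : getElem c (M - 1) hlt ≤ v := by
    rcases eq_or_lt_of_le (Nat.le_sub_one_of_lt (hclen ▸ hi) : i ≤ M - 1) with heq | hlt2
    · subst heq; omega
    · have := (List.pairwise_iff_getElem.mp hcp) i (M - 1) hi hlt hlt2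
      omega
  have hveq : v = getElem c (M - 1) hlt := le_antisymm h1 h2
  have hidx : a + M - 1 < s.length := by omega
  have hcval : getElem c (M - 1) hlt = getElem s (a + M - 1) hidx := by
    have hlt' : M - 1 < (List.take M (List.drop a s)).length := by
      simp [List.length_take, List.length_drop]; omega
    have h' : getElem (List.take M (List.drop a s)) (M - 1) hlt'
        = getElem s (a + M - 1) hidx := by
      rw [List.getElem_take, List.getElem_drop]
      congr 1; omega
    exact h'
  rw [hv]
  simp only [Option.getD_some, hveq, hcval, List.getD_eq_getElem?_getD,
    List.getElem?_eq_getElem hidx, Option.getD_some]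

-- A = m * (sum of the last element of each full descending chunk)
lemma A_eq_sum (k : Int) (M : Nat) (hM : 0 < M) (score : List Int) :
    solution k (M : Int) score
      = (M : Int) * ∑ j ∈ Finset.range ((PySem.List.sorted score (fun x => x) true).length / M),
          (PySem.List.sorted score (fun x => x) true).getD (j * M + M - 1) 0 := by
  unfold solution
  dsimp only
  set s := PySem.List.sorted score (fun x => x) true with hsdef
  have hs : s.Pairwise (fun a b : Int => b ≤ a) := PySem.List.sorted_pairwise_rev score (fun x => x)
  set L := s.length with hL
  rw [PySem.List.pyRange_of_pos _ _ (by exact_mod_cast hM), List.foldl_map,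
    foldl_if_add, zero_add, sum_map_range, Finset.mul_sum]
  set count := (if (0 : Int) < (L : Int) then (((L : Int) - 0 + (M : Int) - 1) / (M : Int)).toNat else 0) with hcount
  have hsummand : ∀ x : Nat,
      (if (((PySem.List.slice s (some (0 + (M : Int) * (x : Int)))
            (some (0 + (M : Int) * (x : Int) + (M : Int)))).length : Int) = (M : Int)) then
        (PySem.List.min? (PySem.List.slice s (some (0 + (M : Int) * (x : Int)))
            (some (0 + (M : Int) * (x : Int) + (M : Int)))) (fun y => y)).getD 0 * (M : Int)
      else 0)
      = (if M * x + M ≤ L then s.getD (M * x + M - 1) 0 * (M : Int) else 0) := by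
    intro x
    have hidx : (0 : Int) + (M : Int) * (x : Int) = ((M * x : Nat) : Int) := by push_cast; ring
    have hsl : PySem.List.slice s (some (0 + (M : Int) * (x : Int)))
        (some (0 + (M : Int) * (x : Int) + (M : Int)))
        = (s.drop (M * x)).take M := by
      rw [hidx, PySem.List.slice_natCast_add]
    rw [hsl]
    have hlen : ((s.drop (M * x)).take M).length = min M (L - M * x) := by
      simp [List.length_take, List.length_drop, ← hL]
    by_cases hfull : M * x + M ≤ L
    · rw [if_pos, if_pos hfull]
      · rw [min_desc_chunk s hs (M * x) M hM hfull]
      · rw [hlen]; congr 1; omega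
    · rw [if_neg, if_neg hfull]
      rw [hlen]
      intro h
      have : min M (L - M * x) = M := by exact_mod_cast h
      omega
  rw [Finset.sum_congr rfl (fun x _ => hsummand x)]
  -- drop the vacuous part of the range and match term by term
  have hsub : Finset.range (L / M) ⊆ Finset.range count := by
    intro x hx
    simp only [Finset.mem_range] at hx ⊢
    have hLpos' : 0 < L := by
      rcases Nat.eq_zero_or_pos L with h0 | h
      · rw [h0, Nat.zero_div] at hx; exact absurd hx (Nat.not_lt_zero x)
      · exact h
    rw [hcount, if_pos (by exact_mod_cast hLpos')]
    have hceil : ((L : Int) - 0 + (M : Int) - 1) = (((L + M - 1 : Nat)) : Int) := by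
      push_cast; omega
    rw [hceil]
    have : ((L + M - 1 : Nat) : Int) / ((M : Nat) : Int) = (((L + M - 1) / M : Nat) : Int) := by
      exact_mod_cast (Int.natCast_div (L + M - 1) M).symm
    rw [this, Int.toNat_natCast]
    calc x < L / M := hx
      _ ≤ (L + M - 1) / M := Nat.div_le_div_right (by omega)
  rw [← Finset.sum_subset hsub (by
    intro x _ hxn
    simp only [Finset.mem_range, not_lt] at hxn
    rw [if_neg]
    intro h
    have : x + 1 ≤ L / M := (Nat.le_div_iff_mul_le hM).mpr
      (by rw [show (x + 1) * M = M * x + M from by ring]; exact h)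
    omega)]
  refine Finset.sum_congr rfl (fun x hx => ?_)
  simp only [Finset.mem_range] at hx
  have hfull : M * x + M ≤ L := by
    have h := (Nat.le_div_iff_mul_le hM).mp hx
    rw [Nat.succ_mul, Nat.mul_comm] at h
    omega
  rw [if_pos hfull]
  ring

-- a value-upward-closed predicate picks out a PREFIX of a descending list
lemma countP_prefix (p : Int → Bool) (hp : ∀ x y : Int, x ≤ y → p x → p y) :
    ∀ (s : List Int), s.Pairwise (fun a b : Int => b ≤ a) →
      ∀ (r : Nat) (hr : r < s.length), (p s[r] = true ↔ r < s.countP p)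
  | [], _, r, hr => by simp at hr
  | a :: t, hs, r, hr => by
    rw [List.pairwise_cons] at hs
    obtain ⟨hle, ht⟩ := hs
    cases r with
    | zero =>
      simp only [List.getElem_cons_zero, List.countP_cons]
      constructor
      · intro hpa; simp [hpa]
      · intro hlt
        by_contra hna
        have hna' : p a = false := by revert hna; cases p a <;> simp
        have ht0 : t.countP p = 0 := List.countP_eq_zero.mpr (fun x hx hpx => by
          have : p a = true := hp x a (hle x hx) hpx
          rw [hna'] at this; exact Bool.false_ne_true this)
        rw [ht0, hna'] at hlt; simp at hlt
    | succ r =>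
      simp only [List.getElem_cons_succ, List.countP_cons]
      have hrt : r < t.length := by simpa using hr
      have hiff := countP_prefix p hp t ht r hrt
      constructor
      · intro hptr
        have hpa : p a = true := hp _ a (hle _ (t.getElem_mem hrt)) hptr
        have := hiff.mp hptr
        simp [hpa]; omega
      · intro hlt
        apply hiff.mpr
        by_cases hpa : p a = true <;> simp [hpa] at hlt <;> omega

-- counting '≥ v' splits into 'strictly > v' plus 'equal to v'
lemma countP_le_split (v : Int) :
    ∀ s : List Int,
      s.countP (fun x => decide (v ≤ x)) = s.countP (fun x => decide (v < x)) + s.count v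
  | [] => by simp
  | a :: t => by
    simp only [List.countP_cons, List.count_cons, countP_le_split v t]
    by_cases h1 : v ≤ a <;> by_cases h2 : v < a <;> by_cases h3 : a = v <;>
      simp [h1, h2, h3] <;> omega

-- in a descending list, rank r holds value v iff r is in v's rank interval
lemma block_val (s : List Int) (hs : s.Pairwise (fun a b : Int => b ≤ a)) (v : Int)
    (r : Nat) (hr : r < s.length)
    (h1 : s.countP (fun x => decide (v < x)) ≤ r)
    (h2 : r < s.countP (fun x => decide (v ≤ x))) : s[r] = v := by
  have hlt := countP_prefix (fun x => decide (v < x))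
    (fun x y hxy hx => by simp at hx ⊢; omega) s hs r hr
  have hle := countP_prefix (fun x => decide (v ≤ x))
    (fun x y hxy hx => by simp at hx ⊢; omega) s hs r hr
  have hA : v ≤ s[r] := by have := hle.mpr h2; simpa using this
  have hB : ¬ v < s[r] := by
    intro h
    exact absurd (hlt.mp (by simpa using h)) (by omega)
  omega

-- the fold of B over the remaining (strictly descending) keys adds exactly the
-- group-minimum ranks not yet passed
lemma fold_spec (M : Nat) (hM : 0 < M) (s : List Int)
    (hs : s.Pairwise (fun a b : Int => b ≤ a))
    (freq : PySem.Dict Int Int) (hfreq : ∀ v : Int, freq.getD v 0 = (s.count v : Int)) :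
    ∀ (K : List Int), K.Pairwise (fun a b : Int => b < a) →
      (∀ x ∈ s, x ∈ K ∨ ∀ u ∈ K, u < x) →
      ∀ (total : Int) (seen : Nat),
      seen = s.countP (fun x => decide (∀ u ∈ K, u < x)) →
      (K.foldl (fun (p : Int × Int) v =>
          let c := freq.getD v 0
          let hi := min (p.2 + c) (((s.length / M * M : Nat) : Int))
          ((if p.2 < hi then p.1 + v * (PySem.Int.floordiv hi (M : Int) - PySem.Int.floordiv p.2 (M : Int)) else p.1),
           p.2 + c)) (total, (seen : Int))).1
        = total + ∑ j ∈ Finset.Ico (seen / M) (s.length / M), s.getD (j * M + M - 1) 0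
  | [], _, _, total, seen, hseen => by
    have hseenL : seen = s.length := by simpa [List.countP_true] using hseen
    subst hseenL
    simp
  | v :: K', hK, hcov, total, seen, hseen => by
    rw [List.pairwise_cons] at hK
    obtain ⟨hvK, hK'⟩ := hK
    set L := s.length with hL
    set g := L / M with hg
    set cnt := s.count v with hcnt
    -- the current seen is the number of elements strictly above v
    have hseenv : seen = s.countP (fun x => decide (v < x)) := by
      rw [hseen]
      apply List.countP_congr
      intro x hx
      simp only [decide_eq_true_eq]
      constructor
      · intro h; exact h v (List.mem_cons_self ..)
      · intro h u hu
        rcases List.mem_cons.mp hu with rfl | hu'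
        · exact h
        · exact lt_trans (hvK u hu') h
    have hcountle : s.countP (fun x => decide (v ≤ x)) = seen + cnt := by
      rw [countP_le_split, ← hseenv, hcnt]
    -- after processing v, seen grows by count v
    have hseen' : seen + cnt = s.countP (fun x => decide (∀ u ∈ K', u < x)) := by
      have heq : s.countP (fun x => decide (∀ u ∈ K', u < x))
          = s.countP (fun x => decide (v ≤ x)) := by
        apply List.countP_congr
        intro x hx
        simp only [decide_eq_true_eq]
        constructor
        · intro h
          rcases hcov x hx with hmem | hall
          · rcases List.mem_cons.mp hmem with rfl | hx'
            · exact le_refl x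
            · exact absurd (h x hx') (lt_irrefl x)
          · exact le_of_lt (hall v (List.mem_cons_self ..))
        · intro h u hu
          exact lt_of_lt_of_le (hvK u hu) h
      rw [heq, hcountle]
    have hcovK' : ∀ x ∈ s, x ∈ K' ∨ ∀ u ∈ K', u < x := by
      intro x hx
      rcases hcov x hx with hmem | hall
      · rcases List.mem_cons.mp hmem with rfl | hx'
        · exact Or.inr hvK
        · exact Or.inl hx'
      · exact Or.inr (fun u hu => hall u (List.mem_cons_of_mem v hu))
    -- one step of the fold
    rw [List.foldl_cons]
    dsimp only
    rw [hfreq v, ← hcnt]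
    have hcast1 : (seen : Int) + (cnt : Int) = ((seen + cnt : Nat) : Int) := by push_cast; ring
    have hcast2 : min ((seen : Int) + (cnt : Int)) ((g * M : Nat) : Int)
        = ((min (seen + cnt) (g * M) : Nat) : Int) := by rw [Nat.cast_min, hcast1]
    rw [hcast2, hcast1]
    set hiN := min (seen + cnt) (g * M) with hhiN
    rw [PySem.Int.floordiv_natCast, PySem.Int.floordiv_natCast]
    simp only [Nat.cast_lt]
    have hrec := fold_spec M hM s hs freq hfreq K' hK' hcovK'
      (if seen < hiN then
        total + v * (((hiN / M : Nat) : Int) - ((seen / M : Nat) : Int))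
      else total) (seen + cnt) hseen'
    rw [hrec, ← hL, ← hg]
    -- arithmetic recomposition of the sum
    have hgL : g * M ≤ L := Nat.div_mul_le_self L M
    have hgMg : g * M / M = g := Nat.mul_div_cancel g hM
    by_cases hguard : seen < hiN
    · rw [if_pos hguard]
      have h1 : seen < g * M := lt_of_lt_of_le hguard (min_le_right _ _)
      have h2 : hiN ≤ g * M := min_le_right _ _
      have h3 : hiN ≤ seen + cnt := min_le_left _ _
      have hdm : seen / M ≤ hiN / M := Nat.div_le_div_right hguard.le
      have hdg : hiN / M ≤ g := by
        calc hiN / M ≤ g * M / M := Nat.div_le_div_right h2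
          _ = g := hgMg
      -- split off the chunk covered by value v
      rw [← Finset.sum_Ico_consecutive
        (fun j => s.getD (j * M + M - 1) 0) hdm hdg]
      -- the chunk is constant v
      have hchunk : ∑ j ∈ Finset.Ico (seen / M) (hiN / M), s.getD (j * M + M - 1) 0
          = ∑ _j ∈ Finset.Ico (seen / M) (hiN / M), v := by
        refine Finset.sum_congr rfl (fun j hj => ?_)
        rw [Finset.mem_Ico] at hj
        have hj1 : (j + 1) * M ≤ hiN := (Nat.le_div_iff_mul_le hM).mp hj.2
        have e5 : (j + 1) * M = j * M + M := by ring
        have hrL : j * M + M - 1 < L := by omega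
        have e1 := Nat.div_add_mod seen M
        have e2 : seen % M < M := Nat.mod_lt _ hM
        have e3 : seen / M * M ≤ j * M := Nat.mul_le_mul_right M hj.1
        have e4 : M * (seen / M) = seen / M * M := Nat.mul_comm _ _
        have hseenr : seen ≤ j * M + M - 1 := by omega
        have hval : s[j * M + M - 1]'(hL ▸ hrL) = v := by
          apply block_val s hs v _ _ (by rw [← hseenv]; exact hseenr)
          rw [hcountle]; omega
        rw [List.getD_eq_getElem?_getD, List.getElem?_eq_getElem (hL ▸ hrL),
          Option.getD_some, hval]
      rw [hchunk, Finset.sum_const, Nat.card_Ico, nsmul_eq_mul]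
      -- the remaining tail is the same interval
      have htail : Finset.Ico ((seen + cnt) / M) g = Finset.Ico (hiN / M) g := by
        by_cases hb : seen + cnt ≤ g * M
        · rw [hhiN, min_eq_left hb]
        · have hb2 : g * M ≤ seen + cnt := by omega
          have hmin : hiN = g * M := by rw [hhiN, min_eq_right hb2]
          have hge : g ≤ (seen + cnt) / M := by
            calc g = g * M / M := hgMg.symm
              _ ≤ (seen + cnt) / M := Nat.div_le_div_right hb2
          rw [hmin, hgMg, Finset.Ico_self, Finset.Ico_eq_empty (not_lt.mpr hge)]
      rw [htail]
      rw [Nat.cast_sub hdm]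
      ring
    · rw [if_neg hguard]
      have hsame : Finset.Ico ((seen + cnt) / M) g = Finset.Ico (seen / M) g := by
        have hle := not_lt.mp hguard
        by_cases hga : g * M ≤ seen
        · have hge1 : g ≤ seen / M := by
            calc g = g * M / M := hgMg.symm
              _ ≤ seen / M := Nat.div_le_div_right hga
          have hge2 : g ≤ (seen + cnt) / M := le_trans hge1 (Nat.div_le_div_right (by omega))
          rw [Finset.Ico_eq_empty (not_lt.mpr hge2), Finset.Ico_eq_empty (not_lt.mpr hge1)]
        · have hga2 : seen < g * M := by omega
          rcases min_le_iff.mp hle with hc | hc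
          · have : cnt = 0 := by omega
            rw [this, Nat.add_zero]
          · exact absurd hc (by omega)
      rw [hsame]

-- B = m * (sum of the group-minimum ranks), via the frequency/rank-count fold
lemma B_eq_sum (k : Int) (M : Nat) (hM : 0 < M) (score : List Int) :
    solution_alt k (M : Int) score
      = (M : Int) * ∑ j ∈ Finset.range ((PySem.List.sorted score (fun x => x) true).length / M),
          (PySem.List.sorted score (fun x => x) true).getD (j * M + M - 1) 0 := by
  unfold solution_alt
  dsimp only
  rw [PySem.Dict.foldl_insert_getD_add_one_eq_counter]
  set s := PySem.List.sorted score (fun x => x) true with hsdef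
  have hs : s.Pairwise (fun a b : Int => b ≤ a) := PySem.List.sorted_pairwise_rev score (fun x => x)
  have hperm : s.Perm score := PySem.List.sorted_perm score (fun x => x) true
  have hlen : score.length = s.length := (hperm.length_eq).symm
  have hfreq : ∀ v : Int, (PySem.Dict.counter score).getD v 0 = (s.count v : Int) := by
    intro v
    rw [PySem.Dict.getD_counter, hperm.count_eq]
  set K := PySem.List.sorted (PySem.Dict.counter score).keys (fun x => x) true with hKdef
  have hKperm : K.Perm (PySem.Set.ofList score) := by
    rw [hKdef, PySem.Dict.keys_counter]
    exact PySem.List.sorted_perm _ _ _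
  have hKnd : K.Nodup := (hKperm.nodup_iff).mpr (PySem.Set.nodup_ofList score)
  have hKge : K.Pairwise (fun a b : Int => b ≤ a) := PySem.List.sorted_pairwise_rev _ _
  have hKdesc : K.Pairwise (fun a b : Int => b < a) := by
    have := hKge.and hKnd
    exact this.imp (fun h => lt_of_le_of_ne h.1 h.2.symm)
  have hcov : ∀ x ∈ s, x ∈ K ∨ ∀ u ∈ K, u < x := by
    intro x hx
    left
    rw [hKdef, PySem.List.mem_sorted, PySem.Dict.keys_counter, PySem.Set.mem_ofList]
    exact (PySem.List.mem_sorted ..).mp hx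
  have hseen0 : (0 : Nat) = s.countP (fun x => decide (∀ u ∈ K, u < x)) := by
    symm
    rw [List.countP_eq_zero]
    intro x hx hpx
    simp only [decide_eq_true_eq] at hpx
    rcases hcov x hx with hmem | _
    · exact absurd (hpx x hmem) (lt_irrefl x)
    · exact absurd (hpx x ((hKdef ▸ (PySem.List.mem_sorted ..)).mpr
        ((PySem.Dict.keys_counter score ▸ PySem.Set.mem_ofList ..).mpr
          ((PySem.List.mem_sorted ..).mp hx)))) (lt_irrefl x)
  have hlim : PySem.Int.floordiv (score.length : Int) (M : Int) * (M : Int)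
      = ((s.length / M * M : Nat) : Int) := by
    rw [hlen, PySem.Int.floordiv_natCast]
    push_cast
    ring
  rw [hlim]
  have := fold_spec M hM s hs (PySem.Dict.counter score) hfreq K hKdesc hcov 0 0 hseen0
  rw [show ((0 : Nat) : Int) = (0 : Int) from rfl] at this
  rw [this, Nat.zero_div, zero_add, ← Finset.range_eq_Ico]

-- ===== VERDICT (by name: the statement is the Claim_ definition above) =====
theorem solution_spec : Claim_equal_solution := by
  intro k m score _ hpre
  unfold Spec_solution
  have hpos : 0 < m := by exact_mod_cast hpre
  lift m to ℕ using hpos.le with M hMcast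
  have hM : 0 < M := by exact_mod_cast hpos
  rw [A_eq_sum k M hM score, B_eq_sum k M hM score]
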